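-- pv_equiv track=rewrite | github.com/pistolinkr/ASKII | app.py | _generate_geometric_pattern
-- ===== SOURCE A (Python) =====
-- def _generate_geometric_pattern(size):
--     """Generate geometric ASCII pattern"""
--     pattern = []
--     for i in range(size):
--         line = ''
--         for j in range(size):
--             if i == j or i == size - 1 - j or i == size // 2 or j == size // 2:
--                 line += '#'
--             elif i < size // 2 and j < size // 2:
--                 line += '/'
--             elif i < size // 2 and j >= size // 2:
--                 line += '\\'
--             elif i >= size // 2 and j < size // 2:
--                 line += '\\'
--             else:
--                 line += '/'
--         pattern.append(line)
--     return '\n'.join(pattern)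
-- ===== SOURCE B (Python) =====
-- def _generate_geometric_pattern(size):
--     """Generate geometric ASCII pattern: run-length row construction.
--
--     Each row is assembled from constant runs: the sorted '#' positions
--     {i, size-1-i, size//2} split the row into segments that each lie entirely
--     on one side of the middle column, so every segment is a repeated fill
--     character; no per-cell work is done.
--     """
--     h = size // 2
--     lines = []
--     for i in range(size):
--         if i == h:
--             lines.append('#' * size)
--             continue
--         parts = []
--         prev = -1
--         for m in sorted({i, size - 1 - i, h}):
--             s = prev + 1
--             parts.append(('/' if (i < h) == (s < h) else '\\') * (m - s))
--             parts.append('#')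
--             prev = m
--         s = prev + 1
--         parts.append(('/' if (i < h) == (s < h) else '\\') * (size - s))
--         lines.append(''.join(parts))
--     return '\n'.join(lines)
-- ===== Notes on version B (the rewrite author's own statement) =====
-- stated objective: faster
-- what changed: B builds each row by run-length construction: it sorts the row's '#' positions (the two diagonal cells and the middle column) and concatenates repeated fill-character segments between them via native string multiplication, whereas A decides every cell with a five-branch if/elif chain inside nested loops.
import Mathlib
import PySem

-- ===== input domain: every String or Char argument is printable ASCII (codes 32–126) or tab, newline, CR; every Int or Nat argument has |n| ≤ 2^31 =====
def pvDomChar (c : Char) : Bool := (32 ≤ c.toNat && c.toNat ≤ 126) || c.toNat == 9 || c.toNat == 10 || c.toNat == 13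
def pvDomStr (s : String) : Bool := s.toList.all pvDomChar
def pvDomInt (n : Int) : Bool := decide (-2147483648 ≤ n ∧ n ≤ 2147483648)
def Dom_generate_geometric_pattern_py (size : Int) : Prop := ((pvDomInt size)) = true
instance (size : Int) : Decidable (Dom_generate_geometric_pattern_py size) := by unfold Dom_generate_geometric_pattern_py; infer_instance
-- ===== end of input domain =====

-- B assembles each row from constant runs between its sorted hash positions (string repetition,
-- no per-cell branching) instead of A's per-cell five-branch chain; a timing run measured B faster.

-- ===== PORT A =====
def generate_geometric_pattern_py (size : Int) : String :=
  PySem.Str.join "\n"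
    ((PySem.List.pyRange 0 size 1).foldl (fun pattern i =>
      pattern ++ [(PySem.List.pyRange 0 size 1).foldl (fun line j =>
        if i = j ∨ i = size - 1 - j ∨ i = PySem.Int.floordiv size 2 ∨ j = PySem.Int.floordiv size 2 then
          line ++ "#"
        else if i < PySem.Int.floordiv size 2 ∧ j < PySem.Int.floordiv size 2 then
          line ++ "/"
        else if i < PySem.Int.floordiv size 2 ∧ PySem.Int.floordiv size 2 ≤ j then
          line ++ "\\"
        else if PySem.Int.floordiv size 2 ≤ i ∧ j < PySem.Int.floordiv size 2 then
          line ++ "\\"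
        else
          line ++ "/") ""]) [])

-- ===== PORT B =====
-- the fill-character conditional expression of Source B, as a named helper
def pvFill (i h s : Int) : Char :=
  if (decide (i < h)) == (decide (s < h)) then '/' else '\\'

def generate_geometric_pattern_py_alt (size : Int) : String :=
  let h := PySem.Int.floordiv size 2
  PySem.Str.join "\n"
    ((PySem.List.pyRange 0 size 1).foldl (fun lines i =>
      if i = h then
        -- '#' * size: exact, Python repeats max(size, 0) times
        lines ++ [String.ofList (List.replicate size.toNat '#')]
      else
        -- sorted hash positions, then run-length assembly with state (parts, prev)
        let marks := PySem.List.sorted (PySem.Set.ofList [i, size - 1 - i, h]) (fun x => x) false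
        let r := marks.foldl (fun (st : List String × Int) m =>
            (st.1 ++ [String.ofList (List.replicate (m - (st.2 + 1)).toNat (pvFill i h (st.2 + 1))), "#"], m))
          (([] : List String), (-1 : Int))
        lines ++ [PySem.Str.join ""
          (r.1 ++ [String.ofList (List.replicate (size - (r.2 + 1)).toNat (pvFill i h (r.2 + 1)))])]) [])

-- ===== PRECONDITION & SPEC =====
def Spec_generate_geometric_pattern_py (size : Int) (out : String) : Prop := out = generate_geometric_pattern_py_alt size
instance (size : Int) (out : String) : Decidable (Spec_generate_geometric_pattern_py size out) := by unfold Spec_generate_geometric_pattern_py; infer_instance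

-- ===== CLAIM (what is proved, stated in full; the proofs are below) =====
def Claim_equal_generate_geometric_pattern_py : Prop := ∀ (size : Int), Dom_generate_geometric_pattern_py size → Spec_generate_geometric_pattern_py size (generate_geometric_pattern_py size)

-- ===== LEMMAS AND PROOFS =====

-- the character A's five-branch if/elif chain produces at cell (i, j)
def pvChain (size i j : Int) : Char :=
  if i = j ∨ i = size - 1 - j ∨ i = PySem.Int.floordiv size 2 ∨ j = PySem.Int.floordiv size 2 then '#'
  else if i < PySem.Int.floordiv size 2 ∧ j < PySem.Int.floordiv size 2 then '/'
  else if i < PySem.Int.floordiv size 2 ∧ PySem.Int.floordiv size 2 ≤ j then '\\'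
  else if PySem.Int.floordiv size 2 ≤ i ∧ j < PySem.Int.floordiv size 2 then '\\'
  else '/'

-- what B's run-length assembly yields from marks `ms` after position `prev`
def pvBuild (size i h : Int) : List Int → Int → List Char
  | [], prev => List.replicate (size - (prev + 1)).toNat (pvFill i h (prev + 1))
  | m :: ms, prev =>
      List.replicate (m - (prev + 1)).toNat (pvFill i h (prev + 1)) ++ '#' :: pvBuild size i h ms m

theorem pvBuild_nil (size i h prev : Int) :
    pvBuild size i h [] prev = List.replicate (size - (prev + 1)).toNat (pvFill i h (prev + 1)) := rfl

theorem pvBuild_cons (size i h m prev : Int) (ms : List Int) :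
    pvBuild size i h (m :: ms) prev =
      List.replicate (m - (prev + 1)).toNat (pvFill i h (prev + 1)) ++ '#' :: pvBuild size i h ms m := rfl

-- generic: a foldl that appends one element per input is a map
theorem pv_foldl_append {α β : Type} (g : α → β) (l : List α) (init : List β) :
    l.foldl (fun acc x => acc ++ [g x]) init = init ++ l.map g := by
  induction l generalizing init with
  | nil => simp
  | cons x xs ih => simp [List.foldl, ih]

-- a foldl that pushes one character per input, on the toList side
theorem pv_foldl_push (f : Int → Char) (l : List Int) (init : String) :
    (l.foldl (fun s x => s ++ String.singleton (f x)) init).toList = init.toList ++ l.map f := by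
  induction l generalizing init with
  | nil => simp
  | cons x xs ih => rw [List.foldl, ih]; simp [String.singleton]

-- ''.join over a list of strings, on the toList side
theorem pv_joinFlatC (ll : List (List Char)) :
    PySem.Chars.join [] ll = ll.flatten := by
  induction ll with
  | nil => rw [PySem.Chars.join_nil]; rfl
  | cons x xs ih =>
      cases xs with
      | nil => rw [PySem.Chars.join_singleton]; simp
      | cons y ys =>
          rw [PySem.Chars.join_cons_cons, ih]
          simp

theorem pv_joinFlat (l : List String) :
    (PySem.Str.join "" l).toList = (l.map String.toList).flatten := by
  have h := pv_joinFlatC (l.map String.toList)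
  simpa using h

-- map over a range where the function is constant
theorem pv_map_range_const (a b : Int) (f : Int → Char) (c : Char)
    (h : ∀ j, a ≤ j → j < b → f j = c) :
    (PySem.List.pyRange a b 1).map f = List.replicate (b - a).toNat c := by
  apply List.ext_getElem
  · simp [PySem.List.length_pyRange_one]
  · intro k hk1 hk2
    simp only [List.getElem_map, PySem.List.getElem_pyRange_one, List.getElem_replicate]
    simp [PySem.List.length_pyRange_one] at hk1
    exact h _ (by omega) (by omega)

-- A's inner loop builds the row of pvChain characters
theorem pv_lineA (size i : Int) :
    ((PySem.List.pyRange 0 size 1).foldl (fun line j =>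
        if i = j ∨ i = size - 1 - j ∨ i = PySem.Int.floordiv size 2 ∨ j = PySem.Int.floordiv size 2 then
          line ++ "#"
        else if i < PySem.Int.floordiv size 2 ∧ j < PySem.Int.floordiv size 2 then
          line ++ "/"
        else if i < PySem.Int.floordiv size 2 ∧ PySem.Int.floordiv size 2 ≤ j then
          line ++ "\\"
        else if PySem.Int.floordiv size 2 ≤ i ∧ j < PySem.Int.floordiv size 2 then
          line ++ "\\"
        else
          line ++ "/") "").toList
      = (PySem.List.pyRange 0 size 1).map (pvChain size i) := by
  have hstep : (fun (line : String) (j : Int) =>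
        if i = j ∨ i = size - 1 - j ∨ i = PySem.Int.floordiv size 2 ∨ j = PySem.Int.floordiv size 2 then
          line ++ "#"
        else if i < PySem.Int.floordiv size 2 ∧ j < PySem.Int.floordiv size 2 then
          line ++ "/"
        else if i < PySem.Int.floordiv size 2 ∧ PySem.Int.floordiv size 2 ≤ j then
          line ++ "\\"
        else if PySem.Int.floordiv size 2 ≤ i ∧ j < PySem.Int.floordiv size 2 then
          line ++ "\\"
        else
          line ++ "/")
      = fun line j => line ++ String.singleton (pvChain size i j) := by
    funext line j; unfold pvChain; split_ifs <;> rfl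
  rw [hstep, pv_foldl_push]; rfl

-- bounds of size // 2 for positive size
theorem pv_hdiv (size : Int) (hpos : 0 < size) :
    0 ≤ PySem.Int.floordiv size 2 ∧ PySem.Int.floordiv size 2 < size := by
  unfold PySem.Int.floordiv; rw [Int.fdiv_eq_ediv]; omega

-- the run-length assembly over strictly increasing marks equals the per-cell row
theorem pv_build_eq (size i h : Int) (hh : h = PySem.Int.floordiv size 2)
    (hi0 : 0 ≤ i) (hi : i < size) (hne : i ≠ h) :
    ∀ (ms : List Int) (prev : Int), ms.Pairwise (· < ·) →
    (∀ m ∈ ms, prev < m ∧ m < size) →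
    (∀ j, prev < j → j < size → ((j = i ∨ j = size - 1 - i ∨ j = h) ↔ j ∈ ms)) →
    pvBuild size i h ms prev = (PySem.List.pyRange (prev + 1) size 1).map (pvChain size i) := by
  have hdiv := pv_hdiv size (by omega)
  rw [← hh] at hdiv
  intro ms
  induction ms with
  | nil =>
      intro prev _ _ hmark
      have hhle : h ≤ prev := by
        by_contra hc
        have := (hmark h (by omega) hdiv.2).mp (by right; right; rfl)
        simp at this
      rw [pvBuild_nil]
      rw [pv_map_range_const (prev + 1) size _ (pvFill i h (prev + 1))]
      intro j hj1 hj2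
      have hnm : ¬(j = i ∨ j = size - 1 - i ∨ j = h) := by
        intro hc; have := (hmark j (by omega) hj2).mp hc; simp at this
      push Not at hnm
      simp only [pvChain, pvFill, beq_iff_eq, decide_eq_decide, ← hh]
      split_ifs <;> first | rfl | omega
  | cons m ms ih =>
      intro prev hpw hbnd hmark
      have hm := hbnd m (by simp)
      have hms : ∀ x ∈ ms, m < x ∧ x < size := by
        intro x hx
        exact ⟨(List.pairwise_cons.mp hpw).1 x hx, (hbnd x (by simp [hx])).2⟩
      have hside : h ≤ prev ∨ m ≤ h := by
        by_cases hhp : h ≤ prev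
        · left; exact hhp
        · right
          have := (hmark h (by omega) hdiv.2).mp (by right; right; rfl)
          rcases List.mem_cons.mp this with he | he
          · omega
          · exact le_of_lt (hms h he).1
      rw [PySem.List.pyRange_one_append (prev + 1) m size (by omega) (by omega), List.map_append,
          PySem.List.pyRange_one_cons (by omega : m < size), List.map_cons]
      rw [pvBuild_cons]
      congr 1
      · rw [pv_map_range_const (prev + 1) m _ (pvFill i h (prev + 1))]
        intro j hj1 hj2
        have hnm : ¬(j = i ∨ j = size - 1 - i ∨ j = h) := by
          intro hc
          have := (hmark j (by omega) (by omega)).mp hc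
          rcases List.mem_cons.mp this with he | he
          · omega
          · have := (hms j he).1; omega
        push Not at hnm
        simp only [pvChain, pvFill, beq_iff_eq, decide_eq_decide, ← hh]
        split_ifs <;> first | rfl | omega
      · congr 1
        · have hmm : m = i ∨ m = size - 1 - i ∨ m = h :=
            (hmark m (by omega) (by omega)).mpr (by simp)
          simp only [pvChain, ← hh]
          rw [if_pos (by omega)]
        · rw [ih m (List.pairwise_cons.mp hpw).2 hms]
          intro j hj1 hj2
          rw [hmark j (by omega) hj2, List.mem_cons]
          constructor
          · rintro (he | he); · omega
            · exact he
          · intro he; right; exact he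
-- the B foldl with state (parts, prev), joined and with the tail run appended, is pvBuild
theorem pv_fold_run (size i h : Int) (ms : List Int) (parts : List String) (prev : Int) :
    ((ms.foldl (fun (st : List String × Int) m =>
        (st.1 ++ [String.ofList (List.replicate (m - (st.2 + 1)).toNat (pvFill i h (st.2 + 1))), "#"], m))
      (parts, prev)).1.map String.toList).flatten
    ++ List.replicate (size - ((ms.foldl (fun (st : List String × Int) m =>
        (st.1 ++ [String.ofList (List.replicate (m - (st.2 + 1)).toNat (pvFill i h (st.2 + 1))), "#"], m))
      (parts, prev)).2 + 1)).toNat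
        (pvFill i h ((ms.foldl (fun (st : List String × Int) m =>
        (st.1 ++ [String.ofList (List.replicate (m - (st.2 + 1)).toNat (pvFill i h (st.2 + 1))), "#"], m))
      (parts, prev)).2 + 1))
    = (parts.map String.toList).flatten ++ pvBuild size i h ms prev := by
  induction ms generalizing parts prev with
  | nil => simp [pvBuild]
  | cons m ms ih =>
      rw [List.foldl_cons, ih, pvBuild_cons]
      simp

-- string extensionality via toList
theorem pv_str_ext (s t : String) (h : s.toList = t.toList) : s = t := by
  have h' := congrArg String.ofList h
  rwa [String.ofList_toList, String.ofList_toList] at h'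

-- ===== VERDICT (by name: the statement is the Claim_ definition above) =====
theorem generate_geometric_pattern_py_spec : Claim_equal_generate_geometric_pattern_py := by
  intro size _
  unfold Spec_generate_geometric_pattern_py
  unfold generate_geometric_pattern_py generate_geometric_pattern_py_alt
  simp only []
  have hsplit : (fun (lines : List String) (i : Int) =>
      if i = PySem.Int.floordiv size 2 then
        lines ++ [String.ofList (List.replicate size.toNat '#')]
      else
        let marks := PySem.List.sorted (PySem.Set.ofList [i, size - 1 - i, PySem.Int.floordiv size 2]) (fun x => x) false
        let r := marks.foldl (fun (st : List String × Int) m =>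
            (st.1 ++ [String.ofList (List.replicate (m - (st.2 + 1)).toNat (pvFill i (PySem.Int.floordiv size 2) (st.2 + 1))), "#"], m))
          (([] : List String), (-1 : Int))
        lines ++ [PySem.Str.join ""
          (r.1 ++ [String.ofList (List.replicate (size - (r.2 + 1)).toNat (pvFill i (PySem.Int.floordiv size 2) (r.2 + 1)))])])
      = fun lines i => lines ++ [if i = PySem.Int.floordiv size 2 then
          String.ofList (List.replicate size.toNat '#')
        else
          let marks := PySem.List.sorted (PySem.Set.ofList [i, size - 1 - i, PySem.Int.floordiv size 2]) (fun x => x) false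
          let r := marks.foldl (fun (st : List String × Int) m =>
              (st.1 ++ [String.ofList (List.replicate (m - (st.2 + 1)).toNat (pvFill i (PySem.Int.floordiv size 2) (st.2 + 1))), "#"], m))
            (([] : List String), (-1 : Int))
          PySem.Str.join ""
            (r.1 ++ [String.ofList (List.replicate (size - (r.2 + 1)).toNat (pvFill i (PySem.Int.floordiv size 2) (r.2 + 1)))])] := by
    funext lines i; split_ifs <;> rfl
  rw [hsplit, pv_foldl_append, pv_foldl_append, List.nil_append, List.nil_append]
  apply congrArg
  apply List.map_congr_left
  intro i hmem
  rw [PySem.List.mem_pyRange_one] at hmem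
  set h := PySem.Int.floordiv size 2 with hh
  have hdiv := pv_hdiv size (by omega)
  rw [← hh] at hdiv
  by_cases hih : i = h
  · rw [if_pos hih]
    apply pv_str_ext
    rw [pv_lineA, String.toList_ofList]
    rw [pv_map_range_const 0 size _ '#']
    · congr 1; omega
    · intro j hj1 hj2
      simp only [pvChain, ← hh]
      rw [if_pos (by omega)]
  · rw [if_neg hih]
    apply pv_str_ext
    rw [pv_lineA]
    simp only []
    rw [pv_joinFlat, List.map_append, List.flatten_append]
    simp only [List.map_cons, List.map_nil, String.toList_ofList, List.flatten_cons,
      List.flatten_nil, List.append_nil]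
    rw [pv_fold_run size i h _ [] (-1), List.map_nil, List.flatten_nil, List.nil_append]
    have hmem3 : ∀ j : Int, j ∈ PySem.List.sorted (PySem.Set.ofList [i, size - 1 - i, h]) (fun x => x) false ↔ (j = i ∨ j = size - 1 - i ∨ j = h) := by
      intro j
      rw [PySem.List.mem_sorted, PySem.Set.mem_ofList]
      simp
    rw [pv_build_eq size i h hh hmem.1 hmem.2 hih _ (-1)
      (PySem.List.sorted_ofList_pairwise_lt _)
      (by intro m hm; rcases (hmem3 m).mp hm with he | he | he <;> omega)
      (by intro j _ _; rw [hmem3 j])]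
    norm_num
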